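-- pv_equiv track=rewrite | github.com/p-mckenzie/Advent_of_Code_2019 | day17.py | identify_locations
-- ===== SOURCE A (Python) =====
-- def identify_locations(outputs):
--     overlaps = [] # overlapping paths for part 1
--     path = [] # all scaffold locations, for part 2
--
--     for i in range(len(outputs)):
--         for j in range(len(outputs[i])):
--             characters = []
--
--             #center
--             characters.append(outputs[i][j]=='#')
--
--             try:
--                 # north
--                 assert i-1>=0
--                 characters.append(outputs[i-1][j]=='#')
--             except:
--                 characters.append(False)
--             try:
--                 # south
--                 assert i+1<=len(outputs)
--                 characters.append(outputs[i+1][j]=='#')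
--             except:
--                 characters.append(False)
--             try:
--                 # east
--                 assert j+1<=len(outputs[i])
--                 characters.append(outputs[i][j+1]=='#')
--             except:
--                 characters.append(False)
--             try:
--                 # west
--                 assert j-1>=0
--                 characters.append(outputs[i][j-1]=='#')
--             except:
--                 characters.append(False)
--
--             if outputs[i][j] not in['#','.']:
--                 start = (i,j)
--
--             if sum(characters)==5:
--                 # it's 2 paths overlapping!
--                 overlaps.append((i,j))
--
--             # store everything in path
--             if characters[0]:
--                 path.append((i,j))
--
--     return overlaps, path, start
-- ===== SOURCE B (Python) =====
-- def identify_locations(outputs):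
--     path = []
--     for i, row in enumerate(outputs):
--         for j, c in enumerate(row):
--             if c == '#':
--                 path.append((i, j))
--             elif c != '.':
--                 start = (i, j)
--     scaffold = set(path)
--     candidates = scaffold
--     for di, dj in ((-1, 0), (1, 0), (0, 1), (0, -1)):
--         candidates = candidates & {(i - di, j - dj) for (i, j) in scaffold}
--     overlaps = [p for p in path if p in candidates]
--     return overlaps, path, start
-- ===== Notes on version B (the rewrite author's own statement) =====
-- stated objective: faster
-- what changed: B replaces A's per-cell try/except neighbour probing entirely by set algebra: one plain pass collects the scaffold cells, then the overlap set is computed as the intersection of the scaffold set with its four translated copies, and overlaps are read off path by one membership test in that precomputed set.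
import Mathlib
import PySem

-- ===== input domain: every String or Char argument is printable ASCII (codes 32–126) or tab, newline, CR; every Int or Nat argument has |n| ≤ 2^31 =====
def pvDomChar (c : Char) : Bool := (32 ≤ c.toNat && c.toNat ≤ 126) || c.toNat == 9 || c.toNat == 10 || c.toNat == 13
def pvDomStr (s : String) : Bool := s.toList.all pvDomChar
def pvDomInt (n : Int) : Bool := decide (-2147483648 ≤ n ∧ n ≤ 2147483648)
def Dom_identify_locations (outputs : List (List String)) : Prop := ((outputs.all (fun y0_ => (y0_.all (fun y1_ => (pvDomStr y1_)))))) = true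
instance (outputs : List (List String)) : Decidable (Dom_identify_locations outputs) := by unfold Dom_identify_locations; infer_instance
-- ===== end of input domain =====

-- B replaces A's per-cell try/except neighbour probing by set algebra — the overlap set is the
-- intersection of the scaffold set with its four translated copies (objective: faster, measured
-- constant-factor in a timing run).


-- ===== PORT A =====
-- Python A: nested index loops; each neighbour is probed under try/except (assert ≥ 0,
-- IndexError on overflow → False); `start` stays unassigned when no non-'#','.' cell exists
-- (Python raises UnboundLocalError at the return — excluded by Pre_; the port returns (0,0) there).
def identify_locations (outputs : List (List String)) : (List (Int × Int)) × (List (Int × Int)) × (Int × Int) :=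
  let r :=
    (PySem.List.pyRange 0 (PySem.List.len outputs) 1).foldl (fun st i =>
      let row := PySem.List.pyGetD outputs i []
      (PySem.List.pyRange 0 (PySem.List.len row) 1).foldl (fun st j =>
        let overlaps := st.1
        let path := st.2.1
        let start := st.2.2
        -- center
        let center := PySem.List.pyGetD row j "" == "#"
        -- north: assert i-1>=0 then outputs[i-1][j]; any failure → False
        let north := decide (0 ≤ i - 1) &&
          ((PySem.List.pyGet? outputs (i - 1)).bind (fun r => PySem.List.pyGet? r j) == some "#")
        -- south: assert i+1<=len(outputs) always holds; outputs[i+1][j] may IndexError → False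
        let south :=
          ((PySem.List.pyGet? outputs (i + 1)).bind (fun r => PySem.List.pyGet? r j) == some "#")
        -- east: assert j+1<=len(outputs[i]) always holds; outputs[i][j+1] may IndexError → False
        let east := (PySem.List.pyGet? row (j + 1) == some "#")
        -- west: assert j-1>=0 then outputs[i][j-1]
        let west := decide (0 ≤ j - 1) && (PySem.List.pyGet? row (j - 1) == some "#")
        let characters := [center, north, south, east, west]
        let start := if !(PySem.List.pyGetD row j "" == "#" || PySem.List.pyGetD row j "" == ".")
          then some (i, j) else start
        let overlaps := if (characters.map (fun b => if b then (1 : Int) else 0)).sum == 5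
          then overlaps ++ [(i, j)] else overlaps
        let path := if center then path ++ [(i, j)] else path
        (overlaps, path, start)) st)
      (([] : List (Int × Int)), ([] : List (Int × Int)), (none : Option (Int × Int)))
  (r.1, r.2.1, r.2.2.getD (0, 0))

-- ===== PORT B =====
-- one plain pass collecting path and start; then scaffold = set(path), the candidate set is the
-- intersection of scaffold with its four translated copies, and overlaps filters path by it
def identify_locations_alt (outputs : List (List String)) : (List (Int × Int)) × (List (Int × Int)) × (Int × Int) :=
  let st :=
    (PySem.List.enumerate outputs 0).foldl (fun st p =>
      (PySem.List.enumerate p.2 0).foldl (fun st q =>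
        if q.2 == "#" then (st.1 ++ [(p.1, q.1)], st.2)
        else if q.2 == "." then st
        else (st.1, some (p.1, q.1))) st)
      (([] : List (Int × Int)), (none : Option (Int × Int)))
  let path := st.1
  let scaffold : PySem.Set (Int × Int) := PySem.Set.ofList path
  let candidates :=
    ([((-1 : Int), (0 : Int)), (1, 0), (0, 1), (0, -1)]).foldl
      (fun cand d => PySem.Set.inter cand
        (PySem.Set.ofList (scaffold.map (fun p => (p.1 - d.1, p.2 - d.2)))))
      scaffold
  let overlaps := path.filter (fun p => PySem.Set.contains candidates p)
  (overlaps, path, st.2.getD (0, 0))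

-- ===== PRECONDITION & SPEC =====
-- Pre_ excludes exactly the grids with no cell outside {'#','.'}: there Python A (and B) never
-- assigns `start` and raises UnboundLocalError at the return.
def Pre_identify_locations (outputs : List (List String)) : Prop :=
  (outputs.any (fun row => row.any (fun c => !(c == "#" || c == ".")))) = true
instance (outputs : List (List String)) : Decidable (Pre_identify_locations outputs) := by
  unfold Pre_identify_locations; infer_instance
def pvWitness_identify_locations : List (List String) := [["#", "^"], [".", "#"]]
def Spec_identify_locations (outputs : List (List String)) (out : (List (Int × Int)) × (List (Int × Int)) × (Int × Int)) : Prop := out = identify_locations_alt outputs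
instance (outputs : List (List String)) (out : (List (Int × Int)) × (List (Int × Int)) × (Int × Int)) : Decidable (Spec_identify_locations outputs out) := by unfold Spec_identify_locations; infer_instance

-- ===== CLAIM (what is proved, stated in full; the proofs are below) =====
def Claim_equal_identify_locations : Prop := ∀ (outputs : List (List String)), Dom_identify_locations outputs → Pre_identify_locations outputs → Spec_identify_locations outputs (identify_locations outputs)

-- ===== LEMMAS AND PROOFS =====

-- neighbour test: in-range and equal to "#" (exactly A's guarded probe, and membership in B's scaffold set)
def nbrB (o : List (List String)) (a b : Int) : Bool :=
  decide (0 ≤ a) && decide (0 ≤ b) &&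
    ((PySem.List.pyGet? o a).bind (fun r => PySem.List.pyGet? r b) == some "#")

def cellsOf (o : List (List String)) : List (Int × Int × String) :=
  (PySem.List.enumerate o 0).flatMap (fun p =>
    (PySem.List.enumerate p.2 0).map (fun q => (p.1, q.1, q.2)))

def centerB (t : Int × Int × String) : Bool := t.2.2 == "#"

def ovCond (o : List (List String)) (t : Int × Int × String) : Bool :=
  centerB t && nbrB o (t.1 - 1) t.2.1 && nbrB o (t.1 + 1) t.2.1 &&
    nbrB o t.1 (t.2.1 + 1) && nbrB o t.1 (t.2.1 - 1)

def pathS (o : List (List String)) : List (Int × Int) :=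
  ((cellsOf o).filter centerB).map (fun t => (t.1, t.2.1))

def ovS (o : List (List String)) : List (Int × Int) :=
  ((cellsOf o).filter (ovCond o)).map (fun t => (t.1, t.2.1))

def startS (o : List (List String)) : Option (Int × Int) :=
  (cellsOf o).foldl
    (fun s t => if !(t.2.2 == "#" || t.2.2 == ".") then some (t.1, t.2.1) else s) none

theorem sum5_eq (b1 b2 b3 b4 b5 : Bool) :
    ((([b1, b2, b3, b4, b5]).map (fun b => if b then (1 : Int) else 0)).sum == 5)
      = (b1 && b2 && b3 && b4 && b5) := by
  cases b1 <;> cases b2 <;> cases b3 <;> cases b4 <;> cases b5 <;> decide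

theorem foldl_triple {α β γ δ : Type} (l : List δ) (f : α → δ → α) (g : β → δ → β)
    (h : γ → δ → γ) (a : α) (b : β) (c : γ) :
    l.foldl (fun st t => (f st.1 t, g st.2.1 t, h st.2.2 t)) (a, b, c)
      = (l.foldl f a, l.foldl g b, l.foldl h c) := by
  induction l generalizing a b c with
  | nil => rfl
  | cons x xs ih => simp [List.foldl_cons, ih]

theorem mem_cellsOf (o : List (List String)) (t : Int × Int × String) :
    t ∈ cellsOf o ↔ ∃ (i j : Nat), ∃ (hi : i < o.length) (hj : j < o[i].length),
      t = ((i : Int), (j : Int), o[i][j]) := by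
  simp only [cellsOf, List.mem_flatMap, List.mem_map, PySem.List.mem_enumerate_iff]
  constructor
  · rintro ⟨p, ⟨i, hi, rfl⟩, q, ⟨j, hj, rfl⟩, rfl⟩
    exact ⟨i, j, hi, by simpa using hj, by simp⟩
  · rintro ⟨i, j, hi, hj, rfl⟩
    exact ⟨(i, o[i]), ⟨i, hi, by simp⟩, (j, o[i][j]), ⟨j, hj, by simp⟩, by simp⟩

theorem mem_pathS (o : List (List String)) (a b : Int) :
    ((a, b) ∈ pathS o) ↔ nbrB o a b = true := by
  constructor
  · intro h
    simp only [pathS, List.mem_map, List.mem_filter] at h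
    obtain ⟨t, ⟨hc, hcen⟩, hpr⟩ := h
    rw [mem_cellsOf] at hc
    obtain ⟨i, j, hi, hj, rfl⟩ := hc
    simp only [Prod.mk.injEq] at hpr
    obtain ⟨rfl, rfl⟩ := hpr
    simp only [centerB, beq_iff_eq] at hcen
    simp [nbrB, PySem.List.pyGet?_natCast, hi, hj, hcen]
  · intro h
    simp only [nbrB, Bool.and_eq_true, decide_eq_true_eq, beq_iff_eq] at h
    obtain ⟨⟨ha, hb⟩, hbind⟩ := h
    rw [PySem.List.pyGet?_of_nonneg o ha] at hbind
    cases hrow : o[a.toNat]? with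
    | none => rw [hrow] at hbind; simp at hbind
    | some row =>
      rw [hrow] at hbind
      simp only [Option.bind_some] at hbind
      rw [PySem.List.pyGet?_of_nonneg row hb] at hbind
      cases hcell : row[b.toNat]? with
      | none => rw [hcell] at hbind; simp at hbind
      | some c =>
        rw [hcell] at hbind
        simp only [Option.some.injEq] at hbind
        subst hbind
        have hi : a.toNat < o.length := by
          by_contra hcon
          simp [List.getElem?_eq_none (by omega : o.length ≤ a.toNat)] at hrow
        have hrow' : row = o[a.toNat] := by
          rw [List.getElem?_eq_getElem hi] at hrow
          exact ((Option.some.injEq _ _).mp hrow).symm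
        have hj : b.toNat < row.length := by
          by_contra hcon
          simp [List.getElem?_eq_none (by omega : row.length ≤ b.toNat)] at hcell
        have hcell' : row[b.toNat] = "#" := by
          rw [List.getElem?_eq_getElem hj] at hcell; exact (Option.some.injEq _ _).mp hcell
        simp only [pathS, List.mem_map, List.mem_filter]
        refine ⟨((a.toNat : Int), (b.toNat : Int), "#"), ⟨?_, by simp [centerB]⟩, ?_⟩
        · rw [mem_cellsOf]
          exact ⟨a.toNat, b.toNat, hi, hrow' ▸ hj, by simp [← hrow', hcell']⟩
        · simp [Int.toNat_of_nonneg ha, Int.toNat_of_nonneg hb]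

-- per-cell step of A, over (overlaps, path, start), phrased on a (row, col, char) cell
def stepCellA (o : List (List String))
    (st : List (Int × Int) × List (Int × Int) × Option (Int × Int)) (t : Int × Int × String) :
    List (Int × Int) × List (Int × Int) × Option (Int × Int) :=
  (if ovCond o t then st.1 ++ [(t.1, t.2.1)] else st.1,
   if centerB t then st.2.1 ++ [(t.1, t.2.1)] else st.2.1,
   if !(t.2.2 == "#" || t.2.2 == ".") then some (t.1, t.2.1) else st.2.2)

-- A's inner loop body with the enumerated (index, char) pair made explicit
def bodyAe (o : List (List String)) (i : Int) (row : List String)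
    (st : List (Int × Int) × List (Int × Int) × Option (Int × Int)) (q : Int × String) :
    List (Int × Int) × List (Int × Int) × Option (Int × Int) :=
  let overlaps := st.1
  let path := st.2.1
  let start := st.2.2
  let center := q.2 == "#"
  let north := decide (0 ≤ i - 1) &&
    ((PySem.List.pyGet? o (i - 1)).bind (fun r => PySem.List.pyGet? r q.1) == some "#")
  let south := ((PySem.List.pyGet? o (i + 1)).bind (fun r => PySem.List.pyGet? r q.1) == some "#")
  let east := (PySem.List.pyGet? row (q.1 + 1) == some "#")
  let west := decide (0 ≤ q.1 - 1) && (PySem.List.pyGet? row (q.1 - 1) == some "#")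
  let characters := [center, north, south, east, west]
  let start := if !(q.2 == "#" || q.2 == ".") then some (i, q.1) else start
  let overlaps := if (characters.map (fun b => if b then (1 : Int) else 0)).sum == 5
    then overlaps ++ [(i, q.1)] else overlaps
  let path := if center then path ++ [(i, q.1)] else path
  (overlaps, path, start)

theorem bodyAe_eq_stepCellA (o : List (List String)) (i : Int) (row : List String)
    (h0i : 0 ≤ i) (hrow : PySem.List.pyGet? o i = some row)
    (st : List (Int × Int) × List (Int × Int) × Option (Int × Int)) (q : Int × String)
    (hq : q ∈ PySem.List.enumerate row 0) :
    bodyAe o i row st q = stepCellA o st (i, q.1, q.2) := by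
  rw [PySem.List.mem_enumerate_iff] at hq
  obtain ⟨m, hm, rfl⟩ := hq
  simp only [bodyAe, stepCellA, ovCond, centerB, nbrB, sum5_eq]
  have h2 : (0 ≤ i + 1) := by omega
  have h3 : ((0 : Int) ≤ (m : Int) + 1) := by omega
  simp [hrow, h0i, h2, h3, Bool.and_assoc]

theorem A_eq (o : List (List String)) :
    identify_locations o = (ovS o, pathS o, (startS o).getD (0, 0)) := by
  have h2 : (PySem.List.enumerate o 0).foldl
      (fun st p => (PySem.List.enumerate p.2 0).foldl (bodyAe o p.1 p.2) st)
      (([] : List (Int × Int)), ([] : List (Int × Int)), (none : Option (Int × Int)))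
      = (cellsOf o).foldl (stepCellA o)
        (([] : List (Int × Int)), ([] : List (Int × Int)), (none : Option (Int × Int))) := by
    rw [cellsOf, List.foldl_flatMap]
    apply PySem.List.foldl_congr_mem
    intro st p hp
    rw [List.foldl_map]
    apply PySem.List.foldl_congr_mem
    intro st' q hq
    rw [PySem.List.mem_enumerate_iff] at hp
    obtain ⟨k, hk, rfl⟩ := hp
    apply bodyAe_eq_stepCellA
    · simp
    · simp
    · simpa using hq
  have hsplit : (cellsOf o).foldl (stepCellA o)
      (([] : List (Int × Int)), ([] : List (Int × Int)), (none : Option (Int × Int)))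
      = (ovS o, pathS o, startS o) := by
    unfold stepCellA
    rw [foldl_triple (cellsOf o)
      (fun acc t => if ovCond o t then acc ++ [(t.1, t.2.1)] else acc)
      (fun acc t => if centerB t then acc ++ [(t.1, t.2.1)] else acc)
      (fun acc t => if !(t.2.2 == "#" || t.2.2 == ".") then some (t.1, t.2.1) else acc)
      [] [] none]
    refine congrArg₂ _ ?_ (congrArg₂ _ ?_ rfl)
    · rw [PySem.List.foldl_append_if (ovCond o) (fun t => (t.1, t.2.1))]
      simp [ovS]
    · rw [PySem.List.foldl_append_if centerB (fun t => (t.1, t.2.1))]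
      simp [pathS]
  have hb : (PySem.List.pyRange 0 (PySem.List.len o) 1).foldl (fun st i =>
      let row := PySem.List.pyGetD o i []
      (PySem.List.pyRange 0 (PySem.List.len row) 1).foldl (fun st j =>
        let overlaps := st.1
        let path := st.2.1
        let start := st.2.2
        let center := PySem.List.pyGetD row j "" == "#"
        let north := decide (0 ≤ i - 1) &&
          ((PySem.List.pyGet? o (i - 1)).bind (fun r => PySem.List.pyGet? r j) == some "#")
        let south :=
          ((PySem.List.pyGet? o (i + 1)).bind (fun r => PySem.List.pyGet? r j) == some "#")
        let east := (PySem.List.pyGet? row (j + 1) == some "#")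
        let west := decide (0 ≤ j - 1) && (PySem.List.pyGet? row (j - 1) == some "#")
        let characters := [center, north, south, east, west]
        let start := if !(PySem.List.pyGetD row j "" == "#" || PySem.List.pyGetD row j "" == ".")
          then some (i, j) else start
        let overlaps := if (characters.map (fun b => if b then (1 : Int) else 0)).sum == 5
          then overlaps ++ [(i, j)] else overlaps
        let path := if center then path ++ [(i, j)] else path
        (overlaps, path, start)) st)
      (([] : List (Int × Int)), ([] : List (Int × Int)), (none : Option (Int × Int)))
      = (ovS o, pathS o, startS o) := by
    rw [← hsplit, ← h2]
    rw [PySem.List.enumerate_eq_map_pyRange o [], List.foldl_map]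
    apply PySem.List.foldl_congr_mem
    intro st i _
    show _ = (PySem.List.enumerate (PySem.List.pyGetD o i []) 0).foldl
      (bodyAe o i (PySem.List.pyGetD o i [])) st
    rw [PySem.List.enumerate_eq_map_pyRange (PySem.List.pyGetD o i []) "", List.foldl_map]
    rfl
  simp only [identify_locations]
  rw [hb]

-- per-cell step of B's first pass, over (path, start)
def stepCellB (st : List (Int × Int) × Option (Int × Int)) (t : Int × Int × String) :
    List (Int × Int) × Option (Int × Int) :=
  (if centerB t then st.1 ++ [(t.1, t.2.1)] else st.1,
   if !(t.2.2 == "#" || t.2.2 == ".") then some (t.1, t.2.1) else st.2)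

theorem foldl_pair {α β δ : Type} (l : List δ) (f : α → δ → α) (g : β → δ → β) (a : α) (b : β) :
    l.foldl (fun st t => (f st.1 t, g st.2 t)) (a, b) = (l.foldl f a, l.foldl g b) := by
  induction l generalizing a b with
  | nil => rfl
  | cons x xs ih => simp [List.foldl_cons, ih]

-- membership in a translated copy of the scaffold set
theorem mem_shift (o : List (List String)) (d1 d2 : Int) (q : Int × Int) :
    (q ∈ (PySem.Set.ofList (pathS o)).map (fun p => (p.1 - d1, p.2 - d2)))
      ↔ (q.1 + d1, q.2 + d2) ∈ pathS o := by
  rw [List.mem_map]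
  constructor
  · rintro ⟨p, hp, rfl⟩
    rw [PySem.Set.mem_ofList] at hp
    have : (p.1 - d1 + d1, p.2 - d2 + d2) = p := by ext <;> simp
    rw [this]; exact hp
  · intro h
    refine ⟨(q.1 + d1, q.2 + d2), ?_, by ext <;> simp⟩
    rw [PySem.Set.mem_ofList]; exact h

-- membership in B's candidate set: scaffold plus all four translated copies
theorem mem_candidates (o : List (List String)) (q : Int × Int) :
    (q ∈ ([((-1 : Int), (0 : Int)), (1, 0), (0, 1), (0, -1)]).foldl
      (fun cand d => PySem.Set.inter cand
        (PySem.Set.ofList ((PySem.Set.ofList (pathS o)).map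
          (fun p => (p.1 - d.1, p.2 - d.2)))))
      (PySem.Set.ofList (pathS o))) ↔
    (nbrB o q.1 q.2 && nbrB o (q.1 - 1) q.2 && nbrB o (q.1 + 1) q.2 &&
      nbrB o q.1 (q.2 + 1) && nbrB o q.1 (q.2 - 1)) = true := by
  obtain ⟨a, b⟩ := q
  simp only [List.foldl_cons, List.foldl_nil, PySem.Set.mem_inter, PySem.Set.mem_ofList,
    mem_shift, mem_pathS, Bool.and_eq_true,
    show ∀ x : Int, x + -1 = x - 1 from fun x => by ring,
    show ∀ x : Int, x + 0 = x from fun x => by ring]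

theorem ovS_eq_filter (o : List (List String)) :
    ovS o = (pathS o).filter (fun p =>
      nbrB o (p.1 - 1) p.2 && nbrB o (p.1 + 1) p.2 && nbrB o p.1 (p.2 + 1) &&
        nbrB o p.1 (p.2 - 1)) := by
  rw [ovS, pathS, List.filter_map, List.filter_filter]
  congr 1
  apply List.filter_congr
  intro t _
  rw [Bool.eq_iff_iff]
  simp only [ovCond, Function.comp, Bool.and_eq_true]
  tauto

theorem B_eq (o : List (List String)) :
    identify_locations_alt o = (ovS o, pathS o, (startS o).getD (0, 0)) := by
  have h2 : (PySem.List.enumerate o 0).foldl (fun st p =>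
      (PySem.List.enumerate p.2 0).foldl (fun st q =>
        if q.2 == "#" then (st.1 ++ [(p.1, q.1)], st.2)
        else if q.2 == "." then st
        else (st.1, some (p.1, q.1))) st)
      (([] : List (Int × Int)), (none : Option (Int × Int)))
      = (cellsOf o).foldl stepCellB
        (([] : List (Int × Int)), (none : Option (Int × Int))) := by
    rw [cellsOf, List.foldl_flatMap]
    apply PySem.List.foldl_congr_mem
    intro st p _
    rw [List.foldl_map]
    apply PySem.List.foldl_congr_mem
    intro st' q _
    simp only [stepCellB, centerB]
    by_cases h1 : q.2 == "#"
    · simp [h1]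
    · by_cases hd : q.2 == "."
      · simp [h1, hd]
      · simp [h1, hd]
  have hsplit : (cellsOf o).foldl stepCellB
      (([] : List (Int × Int)), (none : Option (Int × Int)))
      = (pathS o, startS o) := by
    unfold stepCellB
    rw [foldl_pair (cellsOf o)
      (fun acc t => if centerB t then acc ++ [(t.1, t.2.1)] else acc)
      (fun acc t => if !(t.2.2 == "#" || t.2.2 == ".") then some (t.1, t.2.1) else acc)
      [] none]
    refine congrArg₂ _ ?_ rfl
    rw [PySem.List.foldl_append_if centerB (fun t => (t.1, t.2.1))]
    simp [pathS]
  simp only [identify_locations_alt]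
  rw [h2, hsplit]
  simp only []
  rw [ovS_eq_filter]
  refine congrArg₂ _ ?_ rfl
  apply List.filter_congr
  intro p hp
  rw [Bool.eq_iff_iff, PySem.Set.contains_iff, mem_candidates]
  have hc : nbrB o p.1 p.2 = true := (mem_pathS o p.1 p.2).mp (by simpa using hp)
  simp [hc, Bool.and_assoc]

-- ===== VERDICT (by name: the statement is the Claim_ definition above) =====
theorem identify_locations_spec : Claim_equal_identify_locations := by
  intro o _ _
  unfold Spec_identify_locations
  rw [A_eq, B_eq]
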